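-- pv_equiv track=rewrite | github.com/abhinavg97/ABSA_GNN | absa_gnn/utils/parsing.py | _multi_hot_vector
-- ===== SOURCE A (Python) =====
-- def _multi_hot_vector(labels_doc_dict_list):
--     """
--     Creates multi hot vector for the labels
--     Args:
--         labels_doc_dict_list: A list of dictionary containing labels
--     """
--     label_text_to_label_id = {}
--     label_counter = 0
--     for labels in labels_doc_dict_list:
--         for label in labels.keys():
--             try:
--                 label_text_to_label_id[label]
--             except KeyError:
--                 label_text_to_label_id[label] = label_counter
--                 label_counter += 1
--     zero_vector = [-2 for i in range(len(label_text_to_label_id))]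
--     multi_hot_vector = [zero_vector[:] for i in range(len(labels_doc_dict_list))]
--
--     for i, labels in enumerate(labels_doc_dict_list):
--         for label in labels.keys():
--             multi_hot_vector[i][label_text_to_label_id[label]] = labels[label]
--
--     return multi_hot_vector, label_text_to_label_id
-- ===== SOURCE B (Python) =====
-- def _multi_hot_vector(labels_doc_dict_list):
--     """
--     Creates multi hot vector for the labels (streaming single pass + final pad).
--     """
--     label_text_to_label_id = {}
--     rows = []
--     for labels in labels_doc_dict_list:
--         for label in labels:
--             label_text_to_label_id.setdefault(label, len(label_text_to_label_id))
--         rows.append([labels.get(label, -2) for label in label_text_to_label_id])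
--     width = len(label_text_to_label_id)
--     multi_hot_vector = [row + [-2] * (width - len(row)) for row in rows]
--     return multi_hot_vector, label_text_to_label_id
-- ===== Notes on version B (the rewrite author's own statement) =====
-- stated objective: alternative
-- what changed: A makes two full passes over the data (first build the complete id mapping, then preallocate an all--2 n*K matrix and scatter each dict's values into it); B makes a single streaming pass that extends the mapping and immediately emits a jagged row against the mapping known so far, then pads every row to the final width with -2 at the end - there is no preallocated matrix, no second traversal of the data, and no in-place index assignment.
import Mathlib
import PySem

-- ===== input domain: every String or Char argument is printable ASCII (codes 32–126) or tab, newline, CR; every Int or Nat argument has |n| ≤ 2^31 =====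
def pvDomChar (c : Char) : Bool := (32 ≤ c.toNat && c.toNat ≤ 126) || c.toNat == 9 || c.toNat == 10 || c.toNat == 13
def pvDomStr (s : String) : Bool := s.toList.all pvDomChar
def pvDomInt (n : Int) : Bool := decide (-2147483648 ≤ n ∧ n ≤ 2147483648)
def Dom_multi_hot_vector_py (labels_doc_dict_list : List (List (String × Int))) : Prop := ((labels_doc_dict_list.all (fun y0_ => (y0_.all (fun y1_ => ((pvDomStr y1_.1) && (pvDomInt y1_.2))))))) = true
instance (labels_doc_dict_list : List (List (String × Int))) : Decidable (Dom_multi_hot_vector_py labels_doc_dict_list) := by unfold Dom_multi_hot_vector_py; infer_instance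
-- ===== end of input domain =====

-- B replaces A's two passes (full mapping, then scatter into a preallocated -2 matrix) by one
-- streaming pass emitting jagged rows against the mapping-so-far, padded to full width at the end
-- (objective: alternative).

-- ===== PORT A =====
-- first-match lookup in an association list (dict lookup; rows are Python dicts, keys unique under Pre_)
def pvLookup (m : List (String × Int)) (k : String) : Option Int :=
  match m with
  | [] => none
  | (k', v) :: rest => if k' = k then some v else pvLookup rest k

-- A's id-assignment step: try d[label] / except KeyError: assign counter, counter += 1
def pvStepA (st : List (String × Int) × Int) (kv : String × Int) : List (String × Int) × Int :=
  match pvLookup st.1 kv.1 with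
  | some _ => st
  | none => (st.1 ++ [(kv.1, st.2)], st.2 + 1)

-- A's in-place update of row i of the matrix: multi_hot_vector[i][label_id[label]] = labels[label]
-- ('for label in labels.keys(): … = labels[label]' is ported as a fold over the dict's pairs using
-- the pair's value — exact for a Python dict, whose keys are unique)
def pvMatStepA (m : List (String × Int)) (mat : List (List Int)) (p : Int × List (String × Int)) : List (List Int) :=
  p.2.foldl (fun mat kv =>
    PySem.List.pySetD mat p.1
      (PySem.List.pySetD (PySem.List.pyGetD mat p.1 []) ((pvLookup m kv.1).getD 0) kv.2)) mat

-- literal port of A: id pass with explicit counter, prefilled -2 matrix, scatter over enumerate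
def multi_hot_vector_py (labels_doc_dict_list : List (List (String × Int))) : List (List Int) × (List (String × Int)) :=
  let st := labels_doc_dict_list.foldl (fun st labels => labels.foldl pvStepA st) ([], 0)
  let m := st.1
  let zero_vector := (List.range m.length).map (fun _ => (-2 : Int))
  let mat0 := (List.range labels_doc_dict_list.length).map (fun _ => zero_vector)
  let mat := (PySem.List.enumerate labels_doc_dict_list).foldl (pvMatStepA m) mat0
  (mat, m)

-- ===== PORT B =====
-- B's setdefault step: label_text_to_label_id.setdefault(label, len(label_text_to_label_id))
def pvStepB (m : List (String × Int)) (kv : String × Int) : List (String × Int) :=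
  if (pvLookup m kv.1).isSome then m else m ++ [(kv.1, (m.length : Int))]

-- one jagged row: [labels.get(label, -2) for label in label_text_to_label_id]
def pvGather (m : List (String × Int)) (labels : List (String × Int)) : List Int :=
  m.map (fun p => (pvLookup labels p.1).getD (-2))

-- B's loop body: extend the mapping with this dict's labels, append the row gathered from the
-- mapping known so far
def pvRowStep (st : List (List Int) × List (String × Int)) (labels : List (String × Int)) :
    List (List Int) × List (String × Int) :=
  let m := labels.foldl pvStepB st.2
  (st.1 ++ [pvGather m labels], m)

-- literal port of B: single streaming pass, then pad each row to the final width with -2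
def multi_hot_vector_py_alt (labels_doc_dict_list : List (List (String × Int))) : List (List Int) × (List (String × Int)) :=
  let st := labels_doc_dict_list.foldl pvRowStep ([], [])
  let width := st.2.length
  (st.1.map (fun row => row ++ List.replicate (width - row.length) (-2 : Int)), st.2)

-- ===== PRECONDITION & SPEC =====
-- Each inner list represents a Python dict, whose keys are necessarily distinct; Pre_ states exactly
-- that representation invariant, so it excludes no input the Python function can actually receive.
def Pre_multi_hot_vector_py (labels_doc_dict_list : List (List (String × Int))) : Prop :=
  ∀ labels ∈ labels_doc_dict_list, (labels.map Prod.fst).Nodup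
instance (labels_doc_dict_list : List (List (String × Int))) : Decidable (Pre_multi_hot_vector_py labels_doc_dict_list) := by unfold Pre_multi_hot_vector_py; infer_instance
def pvWitness_multi_hot_vector_py : (List (List (String × Int))) := [[("a", 1), ("b", 2)], [("b", 3)], []]

def Spec_multi_hot_vector_py (labels_doc_dict_list : List (List (String × Int))) (out : List (List Int) × (List (String × Int))) : Prop := out = multi_hot_vector_py_alt labels_doc_dict_list
instance (labels_doc_dict_list : List (List (String × Int))) (out : List (List Int) × (List (String × Int))) : Decidable (Spec_multi_hot_vector_py labels_doc_dict_list out) := by unfold Spec_multi_hot_vector_py; infer_instance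

-- ===== CLAIM (what is proved, stated in full; the proofs are below) =====
def Claim_equal_multi_hot_vector_py : Prop := ∀ (labels_doc_dict_list : List (List (String × Int))), Dom_multi_hot_vector_py labels_doc_dict_list → Pre_multi_hot_vector_py labels_doc_dict_list → Spec_multi_hot_vector_py labels_doc_dict_list (multi_hot_vector_py labels_doc_dict_list)

-- ===== LEMMAS AND PROOFS =====

-- proof-only: the mapping fold shared by both sides (B's is literally this; A's carries a counter)
def pvMapFold (l : List (List (String × Int))) (m : List (String × Int)) : List (String × Int) :=
  l.foldl (fun m labels => labels.foldl pvStepB m) m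

-- proof-only: the jagged rows B produces, written structurally
def pvJag : List (List (String × Int)) → List (String × Int) → List (List Int)
  | [], _ => []
  | labels :: rest, m =>
      pvGather (labels.foldl pvStepB m) labels :: pvJag rest (labels.foldl pvStepB m)

-- proof-only: the scatter of one row into a vector, as A's inner loop performs it
def pvScatter (m : List (String × Int)) (v : List Int) (labels : List (String × Int)) : List Int :=
  labels.foldl (fun v kv => PySem.List.pySetD v ((pvLookup m kv.1).getD 0) kv.2) v

-- proof-only: the mapping stores exactly its position as the id
def pvCanon (m : List (String × Int)) : Prop :=
  ∀ (j : Nat) (h : j < m.length), (m[j]'h).2 = (j : Int)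

theorem pvLookup_eq_none_iff (m : List (String × Int)) (k : String) :
    pvLookup m k = none ↔ k ∉ m.map Prod.fst := by
  induction m with
  | nil => simp [pvLookup]
  | cons hd tl ih =>
    obtain ⟨k', v⟩ := hd
    by_cases h : k' = k
    · simp [pvLookup, h]
    · simp [pvLookup, h, ih]
      tauto

theorem pvLookup_isSome_iff (m : List (String × Int)) (k : String) :
    (pvLookup m k).isSome = true ↔ k ∈ m.map Prod.fst := by
  rw [Option.isSome_iff_ne_none, Ne, pvLookup_eq_none_iff, not_not]

theorem pvMem_lookup (m : List (String × Int)) (hnd : (m.map Prod.fst).Nodup)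
    (k : String) (v : Int) (h : (k, v) ∈ m) : pvLookup m k = some v := by
  induction m with
  | nil => simp at h
  | cons hd tl ih =>
    obtain ⟨k', v'⟩ := hd
    simp only [List.map_cons, List.nodup_cons] at hnd
    rcases List.mem_cons.mp h with h1 | h1
    · obtain ⟨rfl, rfl⟩ := Prod.mk.injEq .. ▸ h1
      simp [pvLookup]
    · have hne : k' ≠ k := by
        rintro rfl
        exact hnd.1 (List.mem_map.mpr ⟨(k', v), h1, rfl⟩)
      simp [pvLookup, hne, ih hnd.2 h1]

-- A's id step from a state whose counter equals the mapping's length is B's setdefault step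
theorem pvStepA_eq (m : List (String × Int)) (kv : String × Int) :
    pvStepA (m, (m.length : Int)) kv = (pvStepB m kv, ((pvStepB m kv).length : Int)) := by
  unfold pvStepA pvStepB
  rcases pvLookup m kv.1 with _ | v
  · simp
  · simp

theorem pvFoldl_inner_eq (labels : List (String × Int)) (m : List (String × Int)) :
    labels.foldl pvStepA (m, (m.length : Int)) =
      (labels.foldl pvStepB m, ((labels.foldl pvStepB m).length : Int)) := by
  induction labels generalizing m with
  | nil => rfl
  | cons kv rest ih => simp only [List.foldl_cons, pvStepA_eq, ih]

theorem pvFoldl_outer_eq (l : List (List (String × Int))) (m : List (String × Int)) :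
    l.foldl (fun st labels => labels.foldl pvStepA st) (m, (m.length : Int)) =
      (pvMapFold l m, ((pvMapFold l m).length : Int)) := by
  induction l generalizing m with
  | nil => rfl
  | cons labels rest ih => simp only [pvMapFold, List.foldl_cons, pvFoldl_inner_eq, ih]

theorem pvCanon_stepB (m : List (String × Int)) (kv : String × Int) (h : pvCanon m) :
    pvCanon (pvStepB m kv) := by
  unfold pvStepB
  split
  · exact h
  · intro j hj
    rcases lt_or_ge j m.length with hlt | hge
    · rw [List.getElem_append_left hlt]; exact h j hlt
    · have hj' : j = m.length := by
        simp at hj; omega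
      subst hj'
      simp

theorem pvCanon_inner (labels : List (String × Int)) (m : List (String × Int)) (h : pvCanon m) :
    pvCanon (labels.foldl pvStepB m) := by
  induction labels generalizing m with
  | nil => exact h
  | cons kv rest ih => exact ih _ (pvCanon_stepB m kv h)

theorem pvCanon_build (l : List (List (String × Int))) (m : List (String × Int)) (h : pvCanon m) :
    pvCanon (pvMapFold l m) := by
  induction l generalizing m with
  | nil => exact h
  | cons labels rest ih => exact ih _ (pvCanon_inner labels m h)

theorem pvNodup_stepB (m : List (String × Int)) (kv : String × Int)
    (h : (m.map Prod.fst).Nodup) : ((pvStepB m kv).map Prod.fst).Nodup := by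
  unfold pvStepB
  split
  · exact h
  · rename_i hn
    have : kv.1 ∉ m.map Prod.fst := by
      rw [← pvLookup_eq_none_iff]
      rcases hh : pvLookup m kv.1 with _ | v
      · rfl
      · simp [hh] at hn
    simp only [List.map_append, List.map_cons, List.map_nil]
    rw [List.nodup_append]
    refine ⟨h, List.nodup_singleton _, ?_⟩
    intro a ha b hb
    rw [List.mem_singleton] at hb
    subst hb
    exact fun heq => this (heq ▸ ha)

theorem pvNodup_inner (labels : List (String × Int)) (m : List (String × Int))
    (h : (m.map Prod.fst).Nodup) : ((labels.foldl pvStepB m).map Prod.fst).Nodup := by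
  induction labels generalizing m with
  | nil => exact h
  | cons kv rest ih => exact ih _ (pvNodup_stepB m kv h)

theorem pvNodup_build (l : List (List (String × Int))) (m : List (String × Int))
    (h : (m.map Prod.fst).Nodup) : ((pvMapFold l m).map Prod.fst).Nodup := by
  induction l generalizing m with
  | nil => exact h
  | cons labels rest ih => exact ih _ (pvNodup_inner labels m h)

-- the mapping only grows by appending
theorem pvPrefix_inner (labels : List (String × Int)) (m : List (String × Int)) :
    ∃ s, labels.foldl pvStepB m = m ++ s := by
  induction labels generalizing m with
  | nil => exact ⟨[], by simp⟩
  | cons kv rest ih =>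
    obtain ⟨s, hs⟩ := ih (pvStepB m kv)
    have he : pvStepB m kv =
        m ++ (if (pvLookup m kv.1).isSome then [] else [(kv.1, (m.length : Int))]) := by
      by_cases h : (pvLookup m kv.1).isSome <;> simp [pvStepB, h]
    refine ⟨(if (pvLookup m kv.1).isSome then [] else [(kv.1, (m.length : Int))]) ++ s, ?_⟩
    rw [List.foldl_cons, hs, he, List.append_assoc]

theorem pvPrefix_build (l : List (List (String × Int))) (m : List (String × Int)) :
    ∃ s, pvMapFold l m = m ++ s := by
  induction l generalizing m with
  | nil => exact ⟨[], by simp [pvMapFold]⟩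
  | cons labels rest ih =>
    obtain ⟨s1, hs1⟩ := pvPrefix_inner labels m
    obtain ⟨s2, hs2⟩ := ih (labels.foldl pvStepB m)
    exact ⟨s1 ++ s2, by simp [pvMapFold] at hs2 ⊢; rw [hs2, hs1, List.append_assoc]⟩

theorem pvKeys_mono_stepB (m : List (String × Int)) (kv : String × Int) (k : String)
    (h : k ∈ m.map Prod.fst) : k ∈ (pvStepB m kv).map Prod.fst := by
  unfold pvStepB; split
  · exact h
  · simp [h]

theorem pvKeys_mono_inner (labels : List (String × Int)) (m : List (String × Int)) (k : String)
    (h : k ∈ m.map Prod.fst) : k ∈ (labels.foldl pvStepB m).map Prod.fst := by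
  induction labels generalizing m with
  | nil => exact h
  | cons kv rest ih => exact ih _ (pvKeys_mono_stepB m kv k h)

theorem pvKeys_mono_outer (l : List (List (String × Int))) (m : List (String × Int)) (k : String)
    (h : k ∈ m.map Prod.fst) : k ∈ (pvMapFold l m).map Prod.fst := by
  induction l generalizing m with
  | nil => exact h
  | cons labels rest ih => exact ih _ (pvKeys_mono_inner labels m k h)

theorem pvMem_keys_stepB_self (m : List (String × Int)) (kv : String × Int) :
    kv.1 ∈ (pvStepB m kv).map Prod.fst := by
  unfold pvStepB
  split
  · rename_i hs
    exact (pvLookup_isSome_iff m kv.1).mp hs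
  · simp

theorem pvCover_inner (labels : List (String × Int)) (m : List (String × Int)) :
    ∀ kv ∈ labels, kv.1 ∈ (labels.foldl pvStepB m).map Prod.fst := by
  induction labels generalizing m with
  | nil => simp
  | cons kv rest ih =>
    intro kv' h
    rcases List.mem_cons.mp h with rfl | h1
    · exact pvKeys_mono_inner rest _ kv'.1 (pvMem_keys_stepB_self m kv')
    · exact ih _ kv' h1

theorem pvCover_outer (l : List (List (String × Int))) (m : List (String × Int)) :
    ∀ labels ∈ l, ∀ kv ∈ labels, kv.1 ∈ (pvMapFold l m).map Prod.fst := by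
  induction l generalizing m with
  | nil => simp
  | cons labels rest ih =>
    intro labels' h kv hkv
    rcases List.mem_cons.mp h with rfl | h1
    · exact pvKeys_mono_outer rest _ kv.1 (pvCover_inner labels' m kv hkv)
    · exact ih _ labels' h1 kv hkv

theorem pvFst_inj (m : List (String × Int)) (hnd : (m.map Prod.fst).Nodup)
    (j j' : Nat) (hj : j < m.length) (hj' : j' < m.length)
    (h : (m[j]'hj).1 = (m[j']'hj').1) : j = j' := by
  have h' : (m.map Prod.fst)[j]'(by simpa) = (m.map Prod.fst)[j']'(by simpa) := by
    simpa using h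
  exact (List.Nodup.getElem_inj_iff hnd).mp h'

theorem pvLookup_pos (m : List (String × Int)) (hc : pvCanon m)
    (hnd : (m.map Prod.fst).Nodup) (k : String) (hk : k ∈ m.map Prod.fst) :
    ∃ (j : Nat) (hj : j < m.length), pvLookup m k = some (j : Int) ∧ (m[j]'hj).1 = k := by
  obtain ⟨p, hp, hfst⟩ := List.mem_map.mp hk
  obtain ⟨j, hj, hpj⟩ := List.mem_iff_getElem.mp hp
  refine ⟨j, hj, ?_, by rw [hpj, hfst]⟩
  have hsnd := hc j hj
  have : (k, (j : Int)) ∈ m := by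
    have : m[j]'hj = (k, (j : Int)) := by
      apply Prod.ext
      · rw [hpj, hfst]
      · exact hsnd
    rw [← this]; exact List.getElem_mem hj
  exact pvMem_lookup m hnd k _ this

-- ===== A-side: the scattered matrix row i is the gather of row i over the final mapping =====

theorem pvMatStepA_eq (m : List (String × Int)) (labels : List (String × Int))
    (mat : List (List Int)) (n : Nat) (h : n < mat.length) :
    pvMatStepA m mat ((n : Int), labels) = mat.set n (pvScatter m (mat.getD n []) labels) := by
  unfold pvMatStepA pvScatter
  simp only [PySem.List.pySetD_natCast, PySem.List.pyGetD_natCast]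
  induction labels generalizing mat with
  | nil =>
    simp only [List.foldl_nil]
    rw [List.getD_eq_getElem _ _ h, List.set_getElem_self]
  | cons kv rest ih =>
    simp only [List.foldl_cons]
    rw [ih (mat.set n _) (by simpa using h)]
    rw [List.set_set]
    congr 1
    congr 1
    simp [List.getD, List.getElem?_set_self (by omega : n < mat.length)]

theorem pvMat_fold (m : List (String × Int)) (zero : List Int)
    (l : List (List (String × Int))) (pre : List (List Int)) :
    (PySem.List.enumerate l ((pre.length : Nat) : Int)).foldl (pvMatStepA m)
        (pre ++ l.map (fun _ => zero)) =
      pre ++ l.map (fun labels => pvScatter m zero labels) := by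
  induction l generalizing pre with
  | nil => simp [PySem.List.enumerate_nil]
  | cons labels rest ih =>
    rw [PySem.List.enumerate_cons, List.foldl_cons]
    rw [show ((labels :: rest).map (fun _ => zero)) = zero :: rest.map (fun _ => zero) from rfl]
    rw [pvMatStepA_eq m labels _ pre.length (by simp)]
    have hgd : (pre ++ zero :: rest.map fun _ => zero).getD pre.length [] = zero := by simp
    rw [hgd]
    have hset : (pre ++ zero :: rest.map fun _ => zero).set pre.length (pvScatter m zero labels)
        = (pre ++ [pvScatter m zero labels]) ++ rest.map (fun _ => zero) := by
      simp
    rw [hset]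
    have hcast : ((pre.length : Nat) : Int) + 1 = (((pre ++ [pvScatter m zero labels]).length : Nat) : Int) := by
      simp only [List.length_append, List.length_cons, List.length_nil]
      push_cast
      omega
    rw [hcast, ih]
    simp

theorem pvScatter_length (m : List (String × Int)) (labels : List (String × Int)) (v : List Int) :
    (pvScatter m v labels).length = v.length := by
  induction labels generalizing v with
  | nil => rfl
  | cons kv rest ih =>
    unfold pvScatter
    simp only [List.foldl_cons]
    rw [show (rest.foldl (fun v kv => PySem.List.pySetD v ((pvLookup m kv.1).getD 0) kv.2) _) = pvScatter m (PySem.List.pySetD v ((pvLookup m kv.1).getD 0) kv.2) rest from rfl]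
    rw [ih]
    exact PySem.List.length_pySetD ..

theorem pvScatter_getElem (M : List (String × Int)) (hc : pvCanon M)
    (hndM : (M.map Prod.fst).Nodup) (labels : List (String × Int)) (v : List Int)
    (hv : v.length = M.length) (hnd : (labels.map Prod.fst).Nodup)
    (hcov : ∀ kv ∈ labels, kv.1 ∈ M.map Prod.fst) (j : Nat) (hj : j < M.length) :
    (pvScatter M v labels)[j]'(by rw [pvScatter_length]; omega) =
      (pvLookup labels ((M[j]'hj).1)).getD (v[j]'(by omega)) := by
  induction labels generalizing v with
  | nil => simp [pvScatter, pvLookup]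
  | cons kv rest ih =>
    obtain ⟨j0, hj0, hlk, hfst⟩ := pvLookup_pos M hc hndM kv.1 (hcov kv (by simp))
    have hstep : pvScatter M v (kv :: rest) = pvScatter M (v.set j0 kv.2) rest := by
      unfold pvScatter
      simp only [List.foldl_cons, hlk, Option.getD_some, PySem.List.pySetD_natCast]
    rw [List.getElem_of_eq hstep]
    simp only [List.map_cons, List.nodup_cons] at hnd
    have hrest := ih (v.set j0 kv.2) (by simpa using hv) hnd.2
      (fun kv' h => hcov kv' (List.mem_cons_of_mem _ h))
    rw [hrest]
    by_cases hk : kv.1 = (M[j]'hj).1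
    · have hj0j : j0 = j := pvFst_inj M hndM j0 j hj0 hj (by rw [hfst, hk])
      subst hj0j
      have hnone : pvLookup rest ((M[j0]'hj).1) = none := by
        rw [pvLookup_eq_none_iff, ← hk]
        exact hnd.1
      rw [hnone]
      rw [show pvLookup (kv :: rest) ((M[j0]'hj).1) = if kv.1 = (M[j0]'hj).1 then some kv.2 else pvLookup rest ((M[j0]'hj).1) from rfl, if_pos hk]
      rw [List.getElem_set_self]
      rfl
    · rw [show pvLookup (kv :: rest) ((M[j]'hj).1) = if kv.1 = (M[j]'hj).1 then some kv.2 else pvLookup rest ((M[j]'hj).1) from rfl, if_neg hk]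
      have hne : j ≠ j0 := by
        rintro rfl
        exact hk hfst.symm
      congr 1
      exact List.getElem_set_ne (by omega) ..

theorem pvScatter_eq_gather (M : List (String × Int)) (hc : pvCanon M)
    (hndM : (M.map Prod.fst).Nodup) (labels : List (String × Int))
    (hnd : (labels.map Prod.fst).Nodup) (hcov : ∀ kv ∈ labels, kv.1 ∈ M.map Prod.fst) :
    pvScatter M (List.replicate M.length (-2)) labels = pvGather M labels := by
  apply List.ext_getElem
  · rw [pvScatter_length]
    simp [pvGather]
  · intro j h1 h2
    have hj : j < M.length := by simpa [pvGather] using h2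
    rw [pvScatter_getElem M hc hndM labels _ (by simp) hnd hcov j hj]
    simp [pvGather]

-- ===== B-side: the padded jagged row i is the gather of row i over the final mapping =====

theorem pvRowStep_fold (l : List (List (String × Int))) (rows : List (List Int))
    (m : List (String × Int)) :
    l.foldl pvRowStep (rows, m) = (rows ++ pvJag l m, pvMapFold l m) := by
  induction l generalizing rows m with
  | nil => simp [pvJag, pvMapFold]
  | cons labels rest ih =>
    simp only [List.foldl_cons, pvRowStep, pvJag, pvMapFold] at *
    rw [ih]
    simp

-- padding a gather over a prefix of M to M's width gives the gather over M, provided all the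
-- row's keys lie in the prefix and M's keys are distinct
theorem pvPad_gather (m s : List (String × Int)) (labels : List (String × Int))
    (hnd : ((m ++ s).map Prod.fst).Nodup)
    (hcov : ∀ kv ∈ labels, kv.1 ∈ m.map Prod.fst) :
    pvGather m labels ++ List.replicate ((m ++ s).length - (pvGather m labels).length) (-2 : Int)
      = pvGather (m ++ s) labels := by
  have hlen : (pvGather m labels).length = m.length := by simp [pvGather]
  have hsnone : ∀ p ∈ s, pvLookup labels p.1 = none := by
    intro p hp
    rw [pvLookup_eq_none_iff]
    intro hmem
    obtain ⟨kv, hkv, hfst⟩ := List.mem_map.mp hmem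
    have h1 : p.1 ∈ m.map Prod.fst := hfst ▸ hcov kv hkv
    have h2 : p.1 ∈ s.map Prod.fst := List.mem_map.mpr ⟨p, hp, rfl⟩
    rw [List.map_append, List.nodup_append] at hnd
    exact hnd.2.2 p.1 h1 p.1 h2 rfl
  have hsrep : s.map (fun p => (pvLookup labels p.1).getD (-2)) =
      List.replicate (s.map (fun p => (pvLookup labels p.1).getD (-2))).length (-2 : Int) := by
    apply List.eq_replicate_of_mem
    intro x hx
    obtain ⟨p, hp, hpx⟩ := List.mem_map.mp hx
    rw [hsnone p hp] at hpx
    exact hpx.symm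
  rw [show pvGather (m ++ s) labels = pvGather m labels ++ s.map (fun p => (pvLookup labels p.1).getD (-2)) by simp [pvGather]]
  rw [hsrep, hlen]
  congr 1
  simp

theorem pvJag_pad (l : List (List (String × Int))) (m : List (String × Int))
    (hnd : ((pvMapFold l m).map Prod.fst).Nodup) :
    (pvJag l m).map (fun row => row ++ List.replicate ((pvMapFold l m).length - row.length) (-2 : Int))
      = l.map (fun labels => pvGather (pvMapFold l m) labels) := by
  induction l generalizing m with
  | nil => rfl
  | cons labels rest ih =>
    have hMF : pvMapFold (labels :: rest) m = pvMapFold rest (labels.foldl pvStepB m) := by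
      simp [pvMapFold]
    rw [hMF] at hnd ⊢
    simp only [pvJag, List.map_cons]
    rw [ih _ hnd]
    congr 1
    obtain ⟨s, hs⟩ := pvPrefix_build rest (labels.foldl pvStepB m)
    rw [hs]
    exact pvPad_gather _ s labels (hs ▸ hnd) (pvCover_inner labels m)

-- ===== VERDICT (by name: the statement is the Claim_ definition above) =====
theorem multi_hot_vector_py_spec : Claim_equal_multi_hot_vector_py := by
  intro l _ hpre
  unfold Spec_multi_hot_vector_py multi_hot_vector_py multi_hot_vector_py_alt
  have h0 : l.foldl (fun st labels => labels.foldl pvStepA st) ([], 0) =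
      (pvMapFold l [], ((pvMapFold l []).length : Int)) := pvFoldl_outer_eq l []
  set M := pvMapFold l [] with hM
  have hndM : (M.map Prod.fst).Nodup := pvNodup_build l [] (by simp)
  have hcM : pvCanon M := pvCanon_build l [] (by intro j hj; simp at hj)
  rw [h0, pvRowStep_fold l [] []]
  show ((PySem.List.enumerate l).foldl (pvMatStepA M)
      ((List.range l.length).map (fun _ => (List.range M.length).map (fun _ => (-2 : Int)))), M)
    = ((pvJag l []).map (fun row => row ++ List.replicate (M.length - row.length) (-2 : Int)), M)
  have hz : (List.range M.length).map (fun _ => (-2 : Int)) = List.replicate M.length (-2) := by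
    simp
  have hmat0 : (List.range l.length).map (fun _ => List.replicate M.length (-2 : Int)) =
      l.map (fun _ => List.replicate M.length (-2 : Int)) := by
    simp [List.map_const']
  have hfold := pvMat_fold M (List.replicate M.length (-2)) l []
  simp only [List.nil_append, List.length_nil, Nat.cast_zero] at hfold
  have hrows : l.map (fun labels => pvScatter M (List.replicate M.length (-2)) labels) =
      l.map (fun labels => pvGather M labels) := by
    apply List.map_congr_left
    intro labels hmem
    exact pvScatter_eq_gather M hcM hndM labels
      (hpre labels hmem) (fun kv hkv => pvCover_outer l [] labels hmem kv hkv)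
  rw [hz, hmat0, hfold, hrows, pvJag_pad l [] (hM ▸ hndM)]
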